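-- pv_equiv track=rewrite | github.com/shitikamiyako/Django_Project3 | question/funcs/get_question_result.py | get_classification_from_score
-- ===== SOURCE A (Python) =====
-- from typing import Dict, List, Tuple
--
-- RISK_THRESHOLD: List[int] = [100, 200]  # L-M: 100, M-H: 200
--
-- TERM_THRESHOLD: List[int] = [100, 200]  # S-M: 100, M-H: 200
--
-- RISK_CLASS_MAPPING: Dict[int, str] = {0: "低め", 1: "そこそこ", 2: "高い"}
--
-- RISK_CLASS_SHORT_MAPPING: Dict[int, str] = {0: "L", 1: "M", 2: "H"}
--
-- TERM_CLASS_MAPPING: Dict[int, str] = {0: "短め", 1: "そこそこ", 2: "長め"}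
--
-- TERM_CLASS_SHORT_MAPPING: Dict[int, str] = {0: "S", 1: "M", 2: "L"}
--
-- def get_classification_from_score(score: Dict[str, int]) -> Tuple[Tuple[str, str], Tuple[str, str]]:
--     """Get classification from score dict.
--
--     return mapping from score dict."""
--     risk_score: int = score["risk"]
--     term_score: int = score["term"]
--
--     risk_flag: List[bool] = [risk_score > t for t in RISK_THRESHOLD]
--     term_flag: List[bool] = [term_score > t for t in TERM_THRESHOLD]
--
--     risk_index: int = sum(risk_flag)
--     risk_result: Tuple[str, str] = (
--         RISK_CLASS_SHORT_MAPPING[risk_index],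
--         RISK_CLASS_MAPPING[risk_index]
--     )
--
--     term_index: int = sum(term_flag)
--     term_result: Tuple[str, str] = (
--         TERM_CLASS_SHORT_MAPPING[term_index],
--         TERM_CLASS_MAPPING[term_index]
--     )
--
--     return risk_result, term_result
-- ===== SOURCE B (Python) =====
-- from bisect import bisect_left
-- from typing import Dict, List, Tuple
--
-- RISK_THRESHOLD: List[int] = [100, 200]
-- TERM_THRESHOLD: List[int] = [100, 200]
-- RISK_CLASS_MAPPING: Dict[int, str] = {0: "低め", 1: "そこそこ", 2: "高い"}
-- RISK_CLASS_SHORT_MAPPING: Dict[int, str] = {0: "L", 1: "M", 2: "H"}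
-- TERM_CLASS_MAPPING: Dict[int, str] = {0: "短め", 1: "そこそこ", 2: "長め"}
-- TERM_CLASS_SHORT_MAPPING: Dict[int, str] = {0: "S", 1: "M", 2: "L"}
--
--
-- def get_classification_from_score(score: Dict[str, int]) -> Tuple[Tuple[str, str], Tuple[str, str]]:
--     """Bucket each score by binary search into the sorted threshold list."""
--     risk_index = bisect_left(RISK_THRESHOLD, score["risk"])
--     term_index = bisect_left(TERM_THRESHOLD, score["term"])
--     return (
--         (RISK_CLASS_SHORT_MAPPING[risk_index], RISK_CLASS_MAPPING[risk_index]),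
--         (TERM_CLASS_SHORT_MAPPING[term_index], TERM_CLASS_MAPPING[term_index]),
--     )
-- ===== Notes on version B (the rewrite author's own statement) =====
-- stated objective: idiomatic
-- what changed: Replaces the build-a-boolean-list-then-sum bucket computation with a binary search (bisect_left) into the sorted threshold list, which gives the same index because bisect_left counts thresholds strictly below the score.
import Mathlib
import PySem

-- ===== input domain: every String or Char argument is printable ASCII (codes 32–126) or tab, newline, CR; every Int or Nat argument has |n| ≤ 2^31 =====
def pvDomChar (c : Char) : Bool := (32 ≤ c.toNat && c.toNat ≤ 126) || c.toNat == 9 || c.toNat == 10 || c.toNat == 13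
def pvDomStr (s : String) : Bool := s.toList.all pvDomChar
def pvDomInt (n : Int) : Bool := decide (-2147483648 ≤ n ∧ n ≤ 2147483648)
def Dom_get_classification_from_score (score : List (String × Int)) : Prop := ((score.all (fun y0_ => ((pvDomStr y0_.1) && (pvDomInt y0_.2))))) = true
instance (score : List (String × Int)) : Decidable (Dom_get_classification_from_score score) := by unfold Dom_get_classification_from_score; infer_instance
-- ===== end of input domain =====

-- ===== PORT A =====
-- B replaces the boolean-list-and-sum bucket index with a bisect_left binary search; return values are identical.
-- Shared module constants (same-module context of both implementations)
def RISK_THRESHOLD : List Int := [100, 200]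
def TERM_THRESHOLD : List Int := [100, 200]
def RISK_CLASS_MAPPING : PySem.Dict Int String := PySem.Dict.ofList [(0, "低め"), (1, "そこそこ"), (2, "高い")]
def RISK_CLASS_SHORT_MAPPING : PySem.Dict Int String := PySem.Dict.ofList [(0, "L"), (1, "M"), (2, "H")]
def TERM_CLASS_MAPPING : PySem.Dict Int String := PySem.Dict.ofList [(0, "短め"), (1, "そこそこ"), (2, "長め")]
def TERM_CLASS_SHORT_MAPPING : PySem.Dict Int String := PySem.Dict.ofList [(0, "S"), (1, "M"), (2, "L")]

def get_classification_from_score (score : List (String × Int)) : (String × String) × (String × String) :=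
  -- score["risk"] / score["term"]: KeyError when the key is missing — excluded by Pre_; the default is never used there
  let risk_score : Int := (PySem.Dict.ofList score).getD "risk" 0
  let term_score : Int := (PySem.Dict.ofList score).getD "term" 0
  let risk_flag : List Bool := RISK_THRESHOLD.map (fun t => decide (risk_score > t))
  let term_flag : List Bool := TERM_THRESHOLD.map (fun t => decide (term_score > t))
  -- sum(list_of_bool) in Python counts the Trues, as an int
  let risk_index : Int := (risk_flag.map (fun b => if b then (1 : Int) else 0)).sum
  -- MAPPING[index]: index is always 0, 1 or 2, so the dict lookup never misses; the "" default is never used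
  let risk_result : String × String :=
    (RISK_CLASS_SHORT_MAPPING.getD risk_index "", RISK_CLASS_MAPPING.getD risk_index "")
  let term_index : Int := (term_flag.map (fun b => if b then (1 : Int) else 0)).sum
  let term_result : String × String :=
    (TERM_CLASS_SHORT_MAPPING.getD term_index "", TERM_CLASS_MAPPING.getD term_index "")
  (risk_result, term_result)

-- ===== PORT B =====
def get_classification_from_score_alt (score : List (String × Int)) : (String × String) × (String × String) :=
  -- bisect.bisect_left ported as PySem.List.bisectLeft; score[...] as in A (KeyError excluded by Pre_)
  let risk_index : Int := (PySem.List.bisectLeft RISK_THRESHOLD ((PySem.Dict.ofList score).getD "risk" 0) : Nat)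
  let term_index : Int := (PySem.List.bisectLeft TERM_THRESHOLD ((PySem.Dict.ofList score).getD "term" 0) : Nat)
  ((RISK_CLASS_SHORT_MAPPING.getD risk_index "", RISK_CLASS_MAPPING.getD risk_index ""),
   (TERM_CLASS_SHORT_MAPPING.getD term_index "", TERM_CLASS_MAPPING.getD term_index ""))

-- ===== PRECONDITION & SPEC =====
-- Pre_: the dict must contain the "risk" and "term" keys; Python A (and B) raise KeyError otherwise.
def Pre_get_classification_from_score (score : List (String × Int)) : Prop :=
  ((PySem.Dict.ofList score).get? "risk").isSome = true ∧ ((PySem.Dict.ofList score).get? "term").isSome = true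
instance (score : List (String × Int)) : Decidable (Pre_get_classification_from_score score) := by
  unfold Pre_get_classification_from_score; infer_instance
def pvWitness_get_classification_from_score : (List (String × Int)) := [("risk", 50), ("term", 250)]
def Spec_get_classification_from_score (score : List (String × Int)) (out : (String × String) × (String × String)) : Prop := out = get_classification_from_score_alt score
instance (score : List (String × Int)) (out : (String × String) × (String × String)) : Decidable (Spec_get_classification_from_score score out) := by unfold Spec_get_classification_from_score; infer_instance

-- ===== CLAIM (what is proved, stated in full; the proofs are below) =====
def Claim_equal_get_classification_from_score : Prop := ∀ (score : List (String × Int)), Dom_get_classification_from_score score → Pre_get_classification_from_score score → Spec_get_classification_from_score score (get_classification_from_score score)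

-- ===== LEMMAS AND PROOFS =====

-- For any score r, the count of thresholds strictly below r (A's sum of flags) equals bisect_left's index.
theorem idx_eq (r : Int) :
    (([100, 200].map (fun t => decide (r > t))).map (fun b => if b then (1 : Int) else 0)).sum
      = ((PySem.List.bisectLeft [(100 : Int), 200] r : Nat) : Int) := by
  rcases lt_or_ge (100 : Int) r with h1 | h1 <;> rcases lt_or_ge (200 : Int) r with h2 | h2 <;>
    simp [PySem.List.bisectLeft, PySem.List.bisectLeftLoop, h1, h2] <;> split_ifs <;> omega

-- ===== VERDICT (by name: the statement is the Claim_ definition above) =====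
theorem get_classification_from_score_spec : Claim_equal_get_classification_from_score := by
  intro score _ _
  unfold Spec_get_classification_from_score
  simp only [get_classification_from_score, get_classification_from_score_alt,
    RISK_THRESHOLD, TERM_THRESHOLD, idx_eq]
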